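-- pv_equiv track=rewrite | github.com/pypi-data/pypi-mirror-404 | packages/headroom-ai/headroom_ai-0.3.0-py3-none-any.whl/headroom/transforms/cache_aligner.py | _cleanup_empty_lines
-- ===== SOURCE A (Python) =====
-- def _cleanup_empty_lines(content: str) -> str:
--     """Remove empty lines that result from date extraction."""
--     lines = content.split("\n")
--     # Remove lines that are now empty after pattern removal
--     lines = [line for line in lines if line.strip() or line == ""]
--
--     # Collapse multiple consecutive empty lines
--     new_lines: list[str] = []
--     prev_empty = False
--     for line in lines:
--         is_empty = not line.strip()
--         if is_empty and prev_empty: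
--             continue
--         new_lines.append(line)
--         prev_empty = is_empty
--
--     return "\n".join(new_lines).strip()
-- ===== SOURCE B (Python) =====
-- def _cleanup_empty_lines(content: str) -> str:
--     """Remove empty lines that result from date extraction."""
--     lines = content.split("\n")
--     out: list[str] = []
--     i = 0
--     n = len(lines)
--     while i < n:
--         if lines[i].strip():
--             out.append(lines[i])
--             i += 1
--         else:
--             # consume a maximal run of blank lines; emit one "" iff it contains a truly-empty line
--             has_true_empty = False
--             while i < n and not lines[i].strip():
--                 if lines[i] == "":
--                     has_true_empty = True
--                 i += 1
--             if has_true_empty: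
--                 out.append("")
--     return "\n".join(out).strip()
-- ===== Notes on version B (the rewrite author's own statement) =====
-- stated objective: alternative
-- what changed: Replaces A's two passes (a filter comprehension dropping whitespace-only lines, then a prev_empty stateful collapse loop) by a single grouped scan that consumes each maximal run of blank lines at once and emits one empty line iff the run contains a truly-empty line.
import Mathlib
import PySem

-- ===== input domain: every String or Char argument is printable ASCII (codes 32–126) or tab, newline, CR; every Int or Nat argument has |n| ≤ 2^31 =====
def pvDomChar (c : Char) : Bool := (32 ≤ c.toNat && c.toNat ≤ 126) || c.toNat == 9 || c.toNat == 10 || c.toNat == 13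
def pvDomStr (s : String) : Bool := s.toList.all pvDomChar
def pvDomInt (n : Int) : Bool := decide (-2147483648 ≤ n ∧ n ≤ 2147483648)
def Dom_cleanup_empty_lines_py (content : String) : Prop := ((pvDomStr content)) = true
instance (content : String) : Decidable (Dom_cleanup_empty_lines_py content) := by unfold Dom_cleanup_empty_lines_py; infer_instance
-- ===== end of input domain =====

-- B replaces A's two passes (filter out whitespace-only lines, then a prev_empty collapse
-- loop) by a single grouped scan over the runs of blank lines; same result, same cost.

-- ===== PORT A =====
def cleanup_empty_lines_py (content : String) : String :=
  -- content.split("\n"); the separator is the nonempty literal "\n", so split? is some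
  let lines := (PySem.Str.split? content "\n").getD []
  -- [line for line in lines if line.strip() or line == ""]
  let lines := lines.filter (fun line => (PySem.Str.strip line != "") || (line == ""))
  -- loop with new_lines / prev_empty
  let r := lines.foldl (fun (st : List String × Bool) line =>
      let is_empty := (PySem.Str.strip line == "")
      if is_empty && st.2 then st else (st.1 ++ [line], is_empty)) (([] : List String), false)
  PySem.Str.strip (PySem.Str.join "\n" r.1)

-- ===== PORT B =====
-- inner while loop of Source B: consume blank lines, tracking whether a truly-empty line was seen
def skipBlanksB : Bool → List String → Bool × List String
  | he, [] => (he, [])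
  | he, l :: rest =>
    if PySem.Str.strip l == "" then skipBlanksB (he || l == "") rest
    else (he, l :: rest)

theorem skipBlanksB_len : ∀ (he : Bool) (ls : List String), (skipBlanksB he ls).2.length ≤ ls.length := by
  intro he ls
  induction ls generalizing he with
  | nil => simp [skipBlanksB]
  | cons l rest ih =>
    simp only [skipBlanksB]
    split
    · exact Nat.le_trans (ih _) (Nat.le_succ _)
    · simp

-- outer while loop of Source B (the first inner-loop iteration, on the blank line itself, is
-- inlined as the initial has_true_empty value)
def goB : List String → List String
  | [] => []
  | l :: rest =>
    if PySem.Str.strip l != "" then l :: goB rest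
    else
      let s := skipBlanksB (l == "") rest
      (if s.1 then [""] else []) ++ goB s.2
termination_by ls => ls.length
decreasing_by
  · simp
  · exact Nat.lt_succ_of_le (skipBlanksB_len (l == "") rest)

def cleanup_empty_lines_py_alt (content : String) : String :=
  let lines := (PySem.Str.split? content "\n").getD []
  PySem.Str.strip (PySem.Str.join "\n" (goB lines))

-- ===== PRECONDITION & SPEC =====
def Spec_cleanup_empty_lines_py (content : String) (out : String) : Prop := out = cleanup_empty_lines_py_alt content
instance (content : String) (out : String) : Decidable (Spec_cleanup_empty_lines_py content out) := by unfold Spec_cleanup_empty_lines_py; infer_instance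

-- ===== CLAIM (what is proved, stated in full; the proofs are below) =====
def Claim_equal_cleanup_empty_lines_py : Prop := ∀ (content : String), Dom_cleanup_empty_lines_py content → Spec_cleanup_empty_lines_py content (cleanup_empty_lines_py content)

-- ===== LEMMAS AND PROOFS =====

-- A's filter predicate
def pB (line : String) : Bool := (PySem.Str.strip line != "") || (line == "")

-- recursive reading of A's collapse loop
def collapseP : Bool → List String → List String
  | _, [] => []
  | prev, l :: ls =>
    if (PySem.Str.strip l == "") && prev then collapseP prev ls
    else l :: collapseP (PySem.Str.strip l == "") ls

theorem foldl_eq_collapseP (ls : List String) : ∀ (acc : List String) (prev : Bool),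
    (ls.foldl (fun (st : List String × Bool) line =>
      let is_empty := (PySem.Str.strip line == "")
      if is_empty && st.2 then st else (st.1 ++ [line], is_empty)) (acc, prev)).1
    = acc ++ collapseP prev ls := by
  induction ls with
  | nil => simp [collapseP]
  | cons l t ih =>
    intro acc prev
    have hcons : ((l :: t).foldl (fun (st : List String × Bool) line =>
        let is_empty := (PySem.Str.strip line == "")
        if is_empty && st.2 then st else (st.1 ++ [line], is_empty)) (acc, prev))
        = (t.foldl (fun (st : List String × Bool) line =>
        let is_empty := (PySem.Str.strip line == "")
        if is_empty && st.2 then st else (st.1 ++ [line], is_empty))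
          (if ((PySem.Str.strip l == "") && prev) = true then (acc, prev)
           else (acc ++ [l], (PySem.Str.strip l == "")))) := rfl
    rw [hcons]
    by_cases h : ((PySem.Str.strip l == "") && prev) = true
    · rw [if_pos h, ih]
      simp only [collapseP]
      rw [if_pos h]
    · rw [if_neg h, ih]
      simp only [collapseP]
      rw [if_neg h, List.append_assoc]
      rfl

theorem skipBlanksB_head : ∀ (he : Bool) (ls : List String) (l' : String) (t : List String),
    (skipBlanksB he ls).2 = l' :: t → (PySem.Str.strip l' == "") = false := by
  intro he ls
  induction ls generalizing he with
  | nil => intro l' t h; simp [skipBlanksB] at h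
  | cons l rest ih =>
    intro l' t h
    simp only [skipBlanksB] at h
    by_cases hb : (PySem.Str.strip l == "") = true
    · rw [if_pos hb] at h; exact ih _ _ _ h
    · rw [if_neg hb] at h
      cases h
      simpa using hb

-- the run invariant: "he" records whether one "" has already been emitted for the current
-- blank run; A's residual computation is collapseP he of the filtered remainder
theorem run_invariant : ∀ (ls : List String) (he : Bool),
    (if he then [""] else []) ++ collapseP he (ls.filter pB)
    = (if (skipBlanksB he ls).1 then [""] else [])
      ++ collapseP (skipBlanksB he ls).1 ((skipBlanksB he ls).2.filter pB) := by
  intro ls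
  induction ls with
  | nil => intro he; simp [skipBlanksB]
  | cons l rest ih =>
    intro he
    by_cases hb : (PySem.Str.strip l == "") = true
    · have hs : PySem.Str.strip l = "" := by simpa using hb
      by_cases he' : (l == "") = true
      · have hl : l = "" := by simpa using he'
        subst hl
        have hfil : (("" : String) :: rest).filter pB = "" :: rest.filter pB := by
          simp [pB, List.filter]
        have hskip : skipBlanksB he ("" :: rest) = skipBlanksB true rest := by
          simp [skipBlanksB, hb]
        rw [hfil, hskip, ← ih true]
        cases he with
        | true => simp [collapseP, hb]
        | false => simp [collapseP, hb]
      · have hne : ¬ (l = "") := by simpa using he'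
        have hpl : pB l = false := by simp [pB, hs, hne]
        have hfil : (l :: rest).filter pB = rest.filter pB := by
          simp [List.filter, hpl]
        have hskip : skipBlanksB he (l :: rest) = skipBlanksB he rest := by
          simp [skipBlanksB, hb, he']
        rw [hfil, hskip, ← ih he]
    · have hskip : skipBlanksB he (l :: rest) = (he, l :: rest) := by
        simp [skipBlanksB, hb]
      rw [hskip]

-- collapseP's flag is irrelevant once the next line is non-blank
theorem collapseP_flag_irrel (l' : String) (t : List String)
    (h : (PySem.Str.strip l' == "") = false) :
    collapseP true ((l' :: t).filter pB) = collapseP false ((l' :: t).filter pB) := by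
  have hs : ¬ PySem.Str.strip l' = "" := by simpa using h
  have hp : pB l' = true := by simp [pB, hs]
  simp [List.filter, hp, collapseP, h]

theorem main_eq : ∀ (ls : List String), collapseP false (ls.filter pB) = goB ls := by
  intro ls
  induction ls using goB.induct with
  | case1 => simp [collapseP, goB]
  | case2 l rest h ih =>
    have hb : (PySem.Str.strip l == "") = false := by simpa using h
    have hs : ¬ PySem.Str.strip l = "" := by simpa using hb
    have hp : pB l = true := by simp [pB, hs]
    simp only [goB, h, if_pos]
    simp [List.filter, hp, collapseP, hb, ih]
  | case3 l rest h s ih =>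
    have hb : (PySem.Str.strip l == "") = true := by simpa using h
    have hss : PySem.Str.strip l = "" := by simpa using hb
    simp only [goB, h]
    have hskip : skipBlanksB false (l :: rest) = skipBlanksB (l == "") rest := by
      simp [skipBlanksB, hb]
    have hr := run_invariant (l :: rest) false
    rw [hskip] at hr
    simp only [Bool.false_eq_true, if_false, List.nil_append] at hr
    rw [hr]
    have hcoll : collapseP (skipBlanksB (l == "") rest).1
        ((skipBlanksB (l == "") rest).2.filter pB) = goB (skipBlanksB (l == "") rest).2 := by
      cases hflag : (skipBlanksB (l == "") rest).1 with
      | false =>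
        rw [← ih]
      | true =>
        cases ht : (skipBlanksB (l == "") rest).2 with
        | nil => simp [collapseP, goB]
        | cons l' t =>
          have hh := skipBlanksB_head (l == "") rest l' t ht
          rw [collapseP_flag_irrel l' t hh, ← ht, ih]
    rw [hcoll]
    simp

-- ===== VERDICT (by name: the statement is the Claim_ definition above) =====
theorem cleanup_empty_lines_py_spec : Claim_equal_cleanup_empty_lines_py := by
  intro content _
  simp only [Spec_cleanup_empty_lines_py, cleanup_empty_lines_py, cleanup_empty_lines_py_alt]
  have hpred : (fun line => (PySem.Str.strip line != "") || (line == "")) = pB := by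
    funext line; rfl
  rw [hpred, foldl_eq_collapseP _ [] false, List.nil_append, main_eq]
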